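-- pv_equiv track=rewrite | github.com/annieteammade-oc/nieuwsland | scripts/quality_gate.py | check_not_duplicate_content
-- ===== SOURCE A (Python) =====
-- def check_not_duplicate_content(content):
--     """Voorkom dat dezelfde tekst twee keer in het artikel staat"""
--     paragraphs = [p.strip() for p in content.split('\n\n') if p.strip() and len(p.strip()) > 50]
--     seen = set()
--     duplicates = []
--     for p in paragraphs:
--         normalized = p[:100].lower()
--         if normalized in seen:
--             duplicates.append(p[:60] + "...")
--         seen.add(normalized)
--
--     if duplicates:
--         return False, f"Duplicate paragrafen gevonden: {len(duplicates)}"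
--     return True, None
-- ===== SOURCE B (Python) =====
-- def check_not_duplicate_content(content):
--     """Voorkom dat dezelfde tekst twee keer in het artikel staat"""
--     paragraphs = [p.strip() for p in content.split('\n\n') if p.strip() and len(p.strip()) > 50]
--     keys = [p[:100].lower() for p in paragraphs]
--     count = 0
--     rest = keys
--     while rest:
--         head, rest = rest[0], rest[1:]
--         if head in rest:
--             count += 1
--     if count > 0:
--         return False, f"Duplicate paragrafen gevonden: {count}"
--     return True, None
-- ===== Notes on version B (the rewrite author's own statement) =====
-- stated objective: alternative
-- what changed: A's single backward pass with a seen-set and a duplicates accumulator list is replaced by a destructuring look-ahead scan with no auxiliary set: each key is checked for another occurrence in the remaining suffix, counting every position whose key reappears later, which equals A's count of positions whose key appeared earlier.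
import Mathlib
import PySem

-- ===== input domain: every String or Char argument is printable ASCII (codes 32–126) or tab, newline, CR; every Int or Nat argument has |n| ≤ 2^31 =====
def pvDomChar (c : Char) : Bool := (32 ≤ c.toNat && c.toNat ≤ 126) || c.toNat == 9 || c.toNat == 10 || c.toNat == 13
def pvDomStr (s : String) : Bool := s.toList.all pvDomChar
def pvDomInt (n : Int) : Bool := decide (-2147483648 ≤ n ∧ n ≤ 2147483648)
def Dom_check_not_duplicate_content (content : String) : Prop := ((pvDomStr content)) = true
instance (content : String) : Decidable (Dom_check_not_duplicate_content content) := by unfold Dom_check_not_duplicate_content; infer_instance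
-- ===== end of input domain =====

-- B drops A's seen-set and duplicates-list accumulation entirely: a destructuring look-ahead
-- scan counts each key that reappears in the remaining suffix (objective: alternative).

-- ===== PORT A =====
def pvParagraphs (content : String) : List (List Char) :=
  ((PySem.Chars.splitOn content.toList ['\n', '\n']).filter
      (fun p => PySem.Chars.strip p ≠ [] && (PySem.Chars.strip p).length > 50)).map
    PySem.Chars.strip

def pvStepA (st : PySem.Set (List Char) × List (List Char)) (p : List Char) :
    PySem.Set (List Char) × List (List Char) :=
  let normalized := PySem.Chars.lower (PySem.List.slice p none (some 100))
  let dups :=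
    if PySem.Set.contains st.1 normalized then
      st.2 ++ [PySem.List.slice p none (some 60) ++ "...".toList]
    else st.2
  (PySem.Set.add st.1 normalized, dups)

def check_not_duplicate_content (content : String) : Bool × Option String :=
  let paragraphs := pvParagraphs content
  let res := paragraphs.foldl pvStepA (PySem.Set.empty, [])
  if res.2 ≠ [] then
    (false, some ("Duplicate paragrafen gevonden: " ++ PySem.Int.toStr (res.2.length : Int)))
  else (true, none)

-- ===== PORT B =====
-- B's while loop over (count, rest): pop the head, look it up in the remaining suffix.
def pvCountB (count : Nat) : List (List Char) → Nat
  | [] => count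
  | head :: rest => pvCountB (if rest.contains head then count + 1 else count) rest

def check_not_duplicate_content_alt (content : String) : Bool × Option String :=
  let paragraphs := pvParagraphs content
  let keys := paragraphs.map (fun p => PySem.Chars.lower (PySem.List.slice p none (some 100)))
  let count := pvCountB 0 keys
  if count > 0 then
    (false, some ("Duplicate paragrafen gevonden: " ++ PySem.Int.toStr (count : Int)))
  else (true, none)

-- ===== PRECONDITION & SPEC =====
def Spec_check_not_duplicate_content (content : String) (out : Bool × Option String) : Prop := out = check_not_duplicate_content_alt content
instance (content : String) (out : Bool × Option String) : Decidable (Spec_check_not_duplicate_content content out) := by unfold Spec_check_not_duplicate_content; infer_instance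

-- ===== CLAIM (what is proved, stated in full; the proofs are below) =====
def Claim_equal_check_not_duplicate_content : Prop := ∀ (content : String), Dom_check_not_duplicate_content content → Spec_check_not_duplicate_content content (check_not_duplicate_content content)

-- ===== LEMMAS AND PROOFS =====

-- A's loop invariant: duplicates collected plus distinct keys seen account for every key processed.
theorem pv_loop_len (ps : List (List Char)) (s : PySem.Set (List Char)) (d : List (List Char)) :
    (ps.foldl pvStepA (s, d)).2.length +
      ((ps.map (fun p => PySem.Chars.lower (PySem.List.slice p none (some 100)))).foldl
        PySem.Set.add s).length
      = d.length + ps.length + s.length := by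
  induction ps generalizing s d with
  | nil => simp
  | cons p ps ih =>
    simp only [List.foldl_cons, List.map_cons, pvStepA]
    by_cases h : PySem.Set.contains s (PySem.Chars.lower (PySem.List.slice p none (some 100)))
    · rw [if_pos h]
      have hadd : PySem.Set.add s (PySem.Chars.lower (PySem.List.slice p none (some 100))) = s := by
        simp only [PySem.Set.add]
        rw [if_pos (by simpa using h)]
      rw [hadd, ih]
      simp; omega
    · rw [if_neg h]
      have hadd : PySem.Set.add s (PySem.Chars.lower (PySem.List.slice p none (some 100)))
          = s ++ [PySem.Chars.lower (PySem.List.slice p none (some 100))] := by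
        simp only [PySem.Set.add]
        rw [if_neg (by simpa using h)]
      rw [hadd, ih]
      simp; omega

-- B's loop invariant: the look-ahead count plus the number of distinct keys is the total length.
theorem pv_countB_len (l : List (List Char)) (c : Nat) :
    pvCountB c l + l.dedup.length = c + l.length := by
  induction l generalizing c with
  | nil => simp [pvCountB]
  | cons k rest ih =>
    simp only [pvCountB, List.length_cons]
    by_cases h : k ∈ rest
    · rw [if_pos (List.contains_iff_mem.mpr h), List.dedup_cons_of_mem h, ih]
      omega
    · rw [if_neg (by simpa using (fun hc => h (List.contains_iff_mem.mp hc))),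
        List.dedup_cons_of_notMem h]
      simp only [List.length_cons]
      have := ih c
      omega

-- The distinct keys seen by A's set are exactly dedup, hence the two counts coincide.
theorem pv_ofList_len_dedup (l : List (List Char)) :
    (PySem.Set.ofList l).length = l.dedup.length :=
  List.Perm.length_eq ((List.perm_ext_iff_of_nodup (PySem.Set.nodup_ofList l)
    (List.nodup_dedup l)).mpr (by intro a; rw [PySem.Set.mem_ofList, List.mem_dedup]))

-- ===== VERDICT (by name: the statement is the Claim_ definition above) =====
theorem check_not_duplicate_content_spec : Claim_equal_check_not_duplicate_content := by
  intro content _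
  unfold Spec_check_not_duplicate_content check_not_duplicate_content check_not_duplicate_content_alt
  dsimp only
  rw [show (PySem.Set.empty : PySem.Set (List Char)) = [] from rfl]
  have hA := pv_loop_len (pvParagraphs content) PySem.Set.empty []
  rw [show (PySem.Set.empty : PySem.Set (List Char)) = [] from rfl, ← PySem.Set.ofList_eq_foldl,
    pv_ofList_len_dedup] at hA
  have hB := pv_countB_len
    ((pvParagraphs content).map (fun p => PySem.Chars.lower (PySem.List.slice p none (some 100)))) 0
  simp only [List.length_nil, Nat.zero_add, Nat.add_zero, List.length_map] at hA hB
  by_cases hd : (List.foldl pvStepA (([] : PySem.Set (List Char)), []) (pvParagraphs content)).2 = []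
  · rw [hd] at hA
    simp only [List.length_nil, Nat.zero_add] at hA
    rw [if_neg (by simp [hd]), if_neg (by omega)]
  · have hn : 0 < (List.foldl pvStepA (([] : PySem.Set (List Char)), []) (pvParagraphs content)).2.length :=
      List.length_pos_of_ne_nil hd
    rw [if_pos (by simpa using hd), if_pos (by omega)]
    simp only [Prod.mk.injEq, Option.some.injEq, true_and]
    congr 2
    omega
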